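-- pv_equiv track=rewrite | github.com/cirosantilli/project-euler-solvers | solvers/168.py | search
-- ===== SOURCE A (Python) =====
-- def search(num_digits: int, multiplier: int, last_digit: int, modulo: int) -> int:
--     shift = 10
--     carry = 0
--
--     current = last_digit
--     result = last_digit
--
--     while num_digits > 1:
--         num_digits -= 1
--         next_val = multiplier * current + carry
--         carry = next_val // 10
--         current = next_val % 10
--
--         if shift < modulo:
--             result += current * shift
--             shift *= 10
--
--     first = multiplier * current + carry
--     if current == 0 or first != last_digit:
--         return 0
--
--     return result
-- ===== SOURCE B (Python) =====
-- def search(num_digits: int, multiplier: int, last_digit: int, modulo: int) -> int: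
--     # Phase 1: accumulate the result digits (only the first few, while shift < modulo).
--     carry = 0
--     current = last_digit
--     result = last_digit
--     shift = 10
--     steps = num_digits - 1
--     while steps > 0 and shift < modulo:
--         carry, current = divmod(multiplier * current + carry, 10)
--         result += current * shift
--         shift *= 10
--         steps -= 1
--     # Phase 2: the result no longer changes; advance (current, carry) with cycle
--     # detection so that a long tail of digits is jumped over in one modulus step.
--     seen = {}
--     while steps > 0 and (current, carry) not in seen:
--         seen[(current, carry)] = steps
--         carry, current = divmod(multiplier * current + carry, 10)
--         steps -= 1
--     if steps > 0:
--         period = seen[(current, carry)] - steps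
--         steps %= period
--         while steps > 0:
--             carry, current = divmod(multiplier * current + carry, 10)
--             steps -= 1
--     first = multiplier * current + carry
--     if current == 0 or first != last_digit:
--         return 0
--     return result
-- ===== Notes on version B (the rewrite author's own statement) =====
-- stated objective: faster
-- what changed: B splits A's single O(num_digits) loop into a short accumulation phase (while shift < modulo) followed by cycle detection on the finite (current, carry) state with a modular jump over the repeating tail, instead of stepping every digit.
import Mathlib
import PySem

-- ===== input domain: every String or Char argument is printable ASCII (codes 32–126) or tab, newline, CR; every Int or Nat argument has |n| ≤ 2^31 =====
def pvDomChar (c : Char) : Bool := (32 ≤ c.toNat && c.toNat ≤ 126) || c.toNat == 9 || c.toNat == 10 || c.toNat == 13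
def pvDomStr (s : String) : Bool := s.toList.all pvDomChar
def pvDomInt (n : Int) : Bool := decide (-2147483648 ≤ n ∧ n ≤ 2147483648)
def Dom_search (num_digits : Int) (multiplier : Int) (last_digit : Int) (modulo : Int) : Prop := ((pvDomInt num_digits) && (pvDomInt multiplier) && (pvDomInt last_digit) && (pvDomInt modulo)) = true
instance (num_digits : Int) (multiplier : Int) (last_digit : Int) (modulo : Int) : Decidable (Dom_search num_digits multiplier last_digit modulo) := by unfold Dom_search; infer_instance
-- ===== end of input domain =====

-- B replaces A's per-digit loop by a short accumulation phase plus a cycle-detection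
-- jump over the repeating (current, carry) tail; the return value is proved identical.

-- ===== PORT A =====
-- A's while-loop; the fuel is the number of remaining iterations, i.e. num_digits - 1 clamped at 0
def searchLoop (multiplier : Int) (modulo : Int) (fuel : Nat) (shift : Int)
    (carry : Int) (current : Int) (result : Int) : Int × Int × Int :=
  match fuel with
  | 0 => (current, carry, result)
  | f + 1 =>
    let next_val := multiplier * current + carry
    let carry' := PySem.Int.floordiv next_val 10
    let current' := PySem.Int.mod next_val 10
    if shift < modulo then
      searchLoop multiplier modulo f (shift * 10) carry' current' (result + current' * shift)
    else
      searchLoop multiplier modulo f shift carry' current' result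

def search (num_digits : Int) (multiplier : Int) (last_digit : Int) (modulo : Int) : Int :=
  let r := searchLoop multiplier modulo (num_digits - 1).toNat 10 0 last_digit last_digit
  let first := multiplier * r.1 + r.2.1
  if r.1 = 0 ∨ first ≠ last_digit then 0 else r.2.2

-- ===== PORT B =====
-- B's first loop (while steps > 0 and shift < modulo); the fuel is the remaining steps,
-- and the Nat returned first is the value of steps when the loop exits
def altPhase1 (multiplier : Int) (modulo : Int) (fuel : Nat) (shift : Int)
    (carry : Int) (current : Int) (result : Int) : Nat × Int × Int × Int :=
  match fuel with
  | 0 => (0, current, carry, result)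
  | f + 1 =>
    if shift < modulo then
      let nv := multiplier * current + carry
      let carry' := PySem.Int.floordiv nv 10
      let current' := PySem.Int.mod nv 10
      altPhase1 multiplier modulo f (shift * 10) carry' current' (result + current' * shift)
    else (f + 1, current, carry, result)

-- B's second loop (while steps > 0 and (current, carry) not in seen)
def altPhase2 (multiplier : Int) (seen : PySem.Dict (Int × Int) Int) (fuel : Nat)
    (current : Int) (carry : Int) : PySem.Dict (Int × Int) Int × Nat × Int × Int :=
  match fuel with
  | 0 => (seen, 0, current, carry)
  | f + 1 =>
    if seen.contains (current, carry) then (seen, f + 1, current, carry)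
    else
      let nv := multiplier * current + carry
      altPhase2 multiplier (seen.insert (current, carry) ((f + 1 : Nat) : Int)) f
        (PySem.Int.mod nv 10) (PySem.Int.floordiv nv 10)

-- B's third loop (while steps > 0 after the modular jump)
def altPhase3 (multiplier : Int) (fuel : Nat) (current : Int) (carry : Int) : Int × Int :=
  match fuel with
  | 0 => (current, carry)
  | f + 1 =>
    let nv := multiplier * current + carry
    altPhase3 multiplier f (PySem.Int.mod nv 10) (PySem.Int.floordiv nv 10)

def search_alt (num_digits : Int) (multiplier : Int) (last_digit : Int) (modulo : Int) : Int :=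
  let p1 := altPhase1 multiplier modulo (num_digits - 1).toNat 10 0 last_digit last_digit
  let p2 := altPhase2 multiplier PySem.Dict.empty p1.1 p1.2.1 p1.2.2.1
  let q :=
    if 0 < p2.2.1 then
      -- Python 'seen[(current, carry)]' cannot miss here (the loop exited on containment); getD is exact.
      let period := p2.1.getD (p2.2.2.1, p2.2.2.2) 0 - (p2.2.1 : Int)
      altPhase3 multiplier (PySem.Int.mod (p2.2.1 : Int) period).toNat p2.2.2.1 p2.2.2.2
    else (p2.2.2.1, p2.2.2.2)
  let first := multiplier * q.1 + q.2
  if q.1 = 0 ∨ first ≠ last_digit then 0 else p1.2.2.2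

-- ===== PRECONDITION & SPEC =====
def Spec_search (num_digits : Int) (multiplier : Int) (last_digit : Int) (modulo : Int) (out : Int) : Prop := out = search_alt num_digits multiplier last_digit modulo
instance (num_digits : Int) (multiplier : Int) (last_digit : Int) (modulo : Int) (out : Int) : Decidable (Spec_search num_digits multiplier last_digit modulo out) := by unfold Spec_search; infer_instance

-- ===== CLAIM (what is proved, stated in full; the proofs are below) =====
def Claim_equal_search : Prop := ∀ (num_digits : Int) (multiplier : Int) (last_digit : Int) (modulo : Int), Dom_search num_digits multiplier last_digit modulo → Spec_search num_digits multiplier last_digit modulo (search num_digits multiplier last_digit modulo)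

-- ===== LEMMAS AND PROOFS =====

-- one digit step on the state (current, carry)
def pvStep (m : Int) (s : Int × Int) : Int × Int :=
  (PySem.Int.mod (m * s.1 + s.2) 10, PySem.Int.floordiv (m * s.1 + s.2) 10)

-- the jump performed between phases 2 and 3 of search_alt
def pvJump (m : Int) (p : PySem.Dict (Int × Int) Int × Nat × Int × Int) : Int × Int :=
  if 0 < p.2.1 then
    altPhase3 m (PySem.Int.mod (p.2.1 : Int) (p.1.getD (p.2.2.1, p.2.2.2) 0 - (p.2.1 : Int))).toNat
      p.2.2.1 p.2.2.2
  else (p.2.2.1, p.2.2.2)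

lemma pvIter_mod {α : Type} (f : α → α) (p : ℕ) (hp : 0 < p) (s : α) (hs : f^[p] s = s) :
    ∀ n : ℕ, f^[n] s = f^[n % p] s := by
  intro n
  induction n using Nat.strong_induction_on with
  | _ n ih =>
    by_cases h : n < p
    · rw [Nat.mod_eq_of_lt h]
    · have hpn : p ≤ n := by omega
      have h1 : n - p + p = n := Nat.sub_add_cancel hpn
      have h2 : f^[n] s = f^[n - p] s := by
        conv_lhs => rw [← h1]
        rw [Function.iterate_add_apply, hs]
      rw [h2, ih (n - p) (by omega), Nat.mod_eq_sub_mod hpn]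

lemma pvToNat_mod (a b : Int) (ha : 0 ≤ a) (hb : 0 < b) :
    (a % b).toNat = a.toNat % b.toNat := by
  rw [Int.toNat_emod ha hb.le]

lemma tailA (m mo : Int) : ∀ (f : Nat) (shift carry cur res : Int), ¬ shift < mo →
    searchLoop m mo f shift carry cur res =
      (let s := (pvStep m)^[f] (cur, carry)
       (s.1, s.2, res)) := by
  intro f
  induction f with
  | zero => intro shift carry cur res _; rfl
  | succ f ih =>
    intro shift carry cur res hmo
    rw [searchLoop]
    simp only [if_neg hmo]
    rw [ih _ _ _ _ hmo, Function.iterate_succ_apply]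
    rfl

lemma linkA (m mo : Int) : ∀ (f : Nat) (shift carry cur res : Int),
    searchLoop m mo f shift carry cur res =
      (let p := altPhase1 m mo f shift carry cur res
       let s := (pvStep m)^[p.1] (p.2.1, p.2.2.1)
       (s.1, s.2, p.2.2.2)) := by
  intro f
  induction f with
  | zero => intro shift carry cur res; rfl
  | succ f ih =>
    intro shift carry cur res
    by_cases hmo : shift < mo
    · rw [searchLoop, altPhase1]
      simp only [if_pos hmo]
      exact ih _ _ _ _
    · rw [tailA m mo _ _ _ _ _ hmo, altPhase1]
      simp only [if_neg hmo]

lemma phase3_eq (m : Int) : ∀ (f : Nat) (cur car : Int),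
    altPhase3 m f cur car = (pvStep m)^[f] (cur, car) := by
  intro f
  induction f with
  | zero => intro cur car; rfl
  | succ f ih =>
    intro cur car
    rw [altPhase3, ih, Function.iterate_succ_apply]
    rfl

def pvInv (m : Int) (seen : PySem.Dict (Int × Int) Int) (steps : Nat) (s : Int × Int) : Prop :=
  ∀ s0 t, seen.get? s0 = some t → (steps : Int) < t ∧ (pvStep m)^[(t - steps).toNat] s0 = s

lemma phase2_eq (m : Int) : ∀ (f : Nat) (cur car : Int) (seen : PySem.Dict (Int × Int) Int),
    pvInv m seen f (cur, car) →
    pvJump m (altPhase2 m seen f cur car) = (pvStep m)^[f] (cur, car) := by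
  intro f
  induction f with
  | zero =>
    intro cur car seen _
    rfl
  | succ f ih =>
    intro cur car seen hinv
    rw [altPhase2]
    by_cases hc : seen.contains (cur, car)
    · simp only [if_pos hc]
      have hsome : (seen.get? (cur, car)).isSome := by
        rw [← PySem.Dict.contains_eq_isSome_get?]; exact hc
      obtain ⟨t, hget⟩ := Option.isSome_iff_exists.mp hsome
      obtain ⟨hlt, hiter⟩ := hinv (cur, car) t hget
      have hgd : seen.getD (cur, car) 0 = t := PySem.Dict.getD_of_get?_eq_some seen 0 hget
      unfold pvJump
      simp only [if_pos (by omega : 0 < f + 1)]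
      rw [hgd, phase3_eq]
      have hp : 0 < (t - ((f + 1 : Nat) : Int)).toNat := by omega
      have hmodcast : (PySem.Int.mod ((f + 1 : Nat) : Int) (t - ((f + 1 : Nat) : Int))).toNat
          = (f + 1) % (t - ((f + 1 : Nat) : Int)).toNat := by
        rw [PySem.Int.mod_eq_emod_of_pos (by omega)]
        rw [pvToNat_mod _ _ (by omega) (by omega)]
        simp
      rw [hmodcast]
      exact (pvIter_mod (pvStep m) ((t - ((f + 1 : Nat) : Int)).toNat) hp (cur, car) hiter (f + 1)).symm
    · simp only [if_neg hc]
      rw [ih]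
      · rw [Function.iterate_succ_apply]
        rfl
      · intro s0 t hget
        rw [PySem.Dict.get?_insert] at hget
        by_cases hs0 : s0 = (cur, car)
        · rw [if_pos hs0] at hget
          obtain rfl : ((f + 1 : Nat) : Int) = t := Option.some.inj hget
          subst hs0
          refine ⟨by omega, ?_⟩
          have e1 : (((f + 1 : Nat) : Int) - (f : Nat)).toNat = 1 := by omega
          rw [e1, Function.iterate_one]
          rfl
        · rw [if_neg hs0] at hget
          obtain ⟨hlt, hiter⟩ := hinv s0 t hget
          refine ⟨by omega, ?_⟩
          have e1 : (t - (f : Nat)).toNat = (t - ((f + 1 : Nat) : Int)).toNat + 1 := by omega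
          rw [e1, Function.iterate_succ_apply', hiter]
          rfl

-- ===== VERDICT (by name: the statement is the Claim_ definition above) =====
theorem search_spec : Claim_equal_search := by
  intro nd m ld mo _
  unfold Spec_search search search_alt
  have hinv : pvInv m PySem.Dict.empty (altPhase1 m mo (nd - 1).toNat 10 0 ld ld).1
      ((altPhase1 m mo (nd - 1).toNat 10 0 ld ld).2.1, (altPhase1 m mo (nd - 1).toNat 10 0 ld ld).2.2.1) := by
    intro s0 t hget
    rw [PySem.Dict.get?_empty] at hget
    cases hget
  have h2 := phase2_eq m (altPhase1 m mo (nd - 1).toNat 10 0 ld ld).1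
    (altPhase1 m mo (nd - 1).toNat 10 0 ld ld).2.1 (altPhase1 m mo (nd - 1).toNat 10 0 ld ld).2.2.1
    PySem.Dict.empty hinv
  rw [linkA]
  simp only [pvJump] at h2
  simp only [h2]
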